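-- pv_equiv track=rewrite | github.com/0bill0/sist_emb_c_ubiquoa | Guilherme_Lessa_MESC2021_Atividade_1_Sist_Emb_Comp_Ubiquoa.py | ordena_palavras
-- ===== SOURCE A (Python) =====
-- def ordena_palavras(lista_string):
-- 	lista_iniciando_com_x = []
-- 	lista_ordenada_exceto_iniciando_com_x = []
-- 	sorted(lista_string)
-- 	for palavra in lista_string:
-- 		if palavra.lower().startswith("x"):
-- 			lista_iniciando_com_x.append(palavra)
-- 		else:
-- 			lista_ordenada_exceto_iniciando_com_x.append(palavra.lower()) #ordenar, independente se a primeira letra é maiúscula ou minúscula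
--
-- 	lista_final = sorted(lista_iniciando_com_x) + sorted(lista_ordenada_exceto_iniciando_com_x)
-- 	return lista_final
-- ===== SOURCE B (Python) =====
-- def ordena_palavras(lista_string):
--     transformed = [p if p.lower().startswith("x") else p.lower() for p in lista_string]
--     return sorted(transformed, key=lambda w: (not w.lower().startswith("x"), w))
-- ===== Notes on version B (the rewrite author's own statement) =====
-- stated objective: idiomatic
-- what changed: Replaced the partition-into-two-lists followed by two separate sorts (plus a dead no-op sorted call) with one map producing each word's transformed value and a single keyed sort whose key (not starts-with-x, word) puts x-words first and orders each group identically.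
import Mathlib
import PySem

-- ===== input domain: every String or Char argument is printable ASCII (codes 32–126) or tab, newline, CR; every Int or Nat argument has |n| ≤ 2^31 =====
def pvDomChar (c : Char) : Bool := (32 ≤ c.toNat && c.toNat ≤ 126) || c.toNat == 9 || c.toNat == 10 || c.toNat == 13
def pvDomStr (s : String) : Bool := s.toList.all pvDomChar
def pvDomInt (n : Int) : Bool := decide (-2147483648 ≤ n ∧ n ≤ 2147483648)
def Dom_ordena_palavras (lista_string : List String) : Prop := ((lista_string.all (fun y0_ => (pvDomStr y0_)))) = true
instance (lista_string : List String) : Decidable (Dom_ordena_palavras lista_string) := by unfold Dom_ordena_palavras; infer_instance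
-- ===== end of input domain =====

-- B replaces A's partition-into-two-lists-and-two-sorts with one map and one keyed sort
-- (key = (word is not an x-word, word)); objective: simpler/idiomatic, not faster.

-- ===== PORT A =====
def ordena_palavras (lista_string : List String) : List String :=
  -- 'sorted(lista_string)' in A is computed and discarded; ported as a discarded let
  let _dead := PySem.List.sorted lista_string (fun s => s)
  let st := lista_string.foldl
    (fun (acc : List String × List String) palavra =>
      if PySem.Str.startswith (PySem.Str.lower palavra) "x" then
        (acc.1 ++ [palavra], acc.2)
      else
        (acc.1, acc.2 ++ [PySem.Str.lower palavra]))
    ([], [])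
  PySem.List.sorted st.1 (fun s => s) ++ PySem.List.sorted st.2 (fun s => s)

-- ===== PORT B =====
def ordena_palavras_alt (lista_string : List String) : List String :=
  let transformed := lista_string.map
    (fun p => if PySem.Str.startswith (PySem.Str.lower p) "x" then p else PySem.Str.lower p)
  PySem.List.sorted2 transformed
    (fun w => !(PySem.Str.startswith (PySem.Str.lower w) "x")) (fun w => w)

-- ===== PRECONDITION & SPEC =====
def Spec_ordena_palavras (lista_string : List String) (out : List String) : Prop := out = ordena_palavras_alt lista_string
instance (lista_string : List String) (out : List String) : Decidable (Spec_ordena_palavras lista_string out) := by unfold Spec_ordena_palavras; infer_instance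

-- ===== CLAIM (what is proved, stated in full; the proofs are below) =====
def Claim_equal_ordena_palavras : Prop := ∀ (lista_string : List String), Dom_ordena_palavras lista_string → Spec_ordena_palavras lista_string (ordena_palavras lista_string)

-- ===== LEMMAS AND PROOFS =====

-- abbreviations used only by the proofs
def pvIsx (p : String) : Bool := PySem.Str.startswith (PySem.Str.lower p) "x"
def pvT (p : String) : String := if pvIsx p then p else PySem.Str.lower p
def pvKey (w : String) : Lex (Bool × String) := toLex (!(pvIsx w), w)

theorem lowerChar_idem (c : Char) : PySem.Chars.lowerChar (PySem.Chars.lowerChar c) = PySem.Chars.lowerChar c := by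
  unfold PySem.Chars.lowerChar PySem.Chars.isupper
  split_ifs with h1 h2 <;> try rfl
  exfalso
  simp only [Bool.and_eq_true, decide_eq_true_eq, Char.le_def, UInt32.le_iff_toNat_le] at h1 h2
  have hA : ('A').val.toNat = 65 := rfl
  have hZ : ('Z').val.toNat = 90 := rfl
  have hc : c.toNat = c.val.toNat := rfl
  have hvalid : (c.toNat + 32).isValidChar := Or.inl (by omega)
  have hv : ((Char.ofNat (c.toNat + 32)).val.toNat) = c.toNat + 32 := by
    show (Char.ofNat (c.toNat + 32)).toNat = c.toNat + 32
    rw [Char.toNat_ofNat, if_pos hvalid]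
  omega

theorem lower_idem (s : String) : PySem.Str.lower (PySem.Str.lower s) = PySem.Str.lower s := by
  unfold PySem.Str.lower PySem.Chars.lower
  rw [String.toList_ofList, List.map_map]
  congr 1
  apply List.map_congr_left
  intro c _
  exact lowerChar_idem c

theorem isx_lower (p : String) : pvIsx (PySem.Str.lower p) = pvIsx p := by
  unfold pvIsx
  rw [lower_idem]

-- the accumulator loop of A, characterised
theorem foldA (l : List String) (acc : List String × List String) :
    l.foldl
      (fun (acc : List String × List String) palavra =>
        if PySem.Str.startswith (PySem.Str.lower palavra) "x" then
          (acc.1 ++ [palavra], acc.2)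
        else
          (acc.1, acc.2 ++ [PySem.Str.lower palavra])) acc
    = (acc.1 ++ l.filter pvIsx, acc.2 ++ (l.filter (fun p => !pvIsx p)).map PySem.Str.lower) := by
  induction l generalizing acc with
  | nil => simp
  | cons p l ih =>
    rw [List.foldl_cons]
    by_cases h : pvIsx p
    · rw [if_pos (show PySem.Str.startswith (PySem.Str.lower p) "x" = true from h), ih]
      simp [List.filter_cons, h, List.append_assoc]
    · rw [if_neg (show ¬ PySem.Str.startswith (PySem.Str.lower p) "x" = true from h), ih]
      simp [List.filter_cons, h, List.append_assoc]

-- sorted2 with keys (k1, id) is sorted with the lexicographic key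
theorem sorted2_eq_sorted_lex (xs : List String) (k1 : String → Bool) :
    PySem.List.sorted2 xs k1 (fun w => w)
      = PySem.List.sorted xs (fun w => toLex (k1 w, w)) := by
  show xs.foldl (fun acc x => PySem.List.insertBy _ x acc) []
     = xs.foldl (fun acc x => PySem.List.insertBy _ x acc) []
  have hbef : (fun a b => decide (k1 a < k1 b) || !decide (k1 b < k1 a) && decide (a < b))
      = (fun (a b : String) => decide (toLex (k1 a, a) < toLex (k1 b, b))) := by
    funext a b
    rcases lt_trichotomy (k1 a) (k1 b) with h | h | h
    · simp [h, not_lt_of_gt h, Prod.Lex.lt_iff]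
    · simp [h, Prod.Lex.lt_iff]
    · have hne : k1 a ≠ k1 b := ne_of_gt h
      simp [h, not_lt_of_gt h, Prod.Lex.lt_iff, hne]
  rw [hbef]

theorem perm_transformed (l : List String) :
    (l.map pvT).Perm (l.filter pvIsx ++ (l.filter (fun p => !pvIsx p)).map PySem.Str.lower) := by
  induction l with
  | nil => simp
  | cons p l ih =>
    by_cases h : pvIsx p
    · have h1 : pvT p = p := by simp [pvT, h]
      simpa [List.filter_cons, h, h1] using ih.cons p
    · have h1 : pvT p = PySem.Str.lower p := by simp [pvT, h]
      have h2 := (ih.cons (PySem.Str.lower p)).trans List.perm_middle.symm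
      simpa [List.filter_cons, h, h1] using h2

theorem key_injective : Function.Injective pvKey := by
  intro a b h
  unfold pvKey at h
  have := congrArg (fun x => (ofLex x).2) h
  simpa using this

-- A's result is pairwise ≤ under pvKey
theorem pairwiseA (l : List String) :
    List.Pairwise (fun a b => pvKey a ≤ pvKey b)
      (PySem.List.sorted (l.filter pvIsx) (fun s => s)
        ++ PySem.List.sorted ((l.filter (fun p => !pvIsx p)).map PySem.Str.lower) (fun s => s)) := by
  rw [List.pairwise_append]
  refine ⟨?_, ?_, ?_⟩
  · refine (PySem.List.sorted_pairwise _ _).imp_of_mem ?_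
    intro a b ha hb hab
    rw [PySem.List.mem_sorted] at ha hb
    have hxa : pvIsx a = true := List.of_mem_filter ha
    have hxb : pvIsx b = true := List.of_mem_filter hb
    simp [pvKey, hxa, hxb, Prod.Lex.le_iff, hab]
  · refine (PySem.List.sorted_pairwise _ _).imp_of_mem ?_
    intro a b ha hb hab
    rw [PySem.List.mem_sorted] at ha hb
    obtain ⟨a', ha', rfl⟩ := List.mem_map.mp ha
    obtain ⟨b', hb', rfl⟩ := List.mem_map.mp hb
    have hxa : pvIsx a' = false := by simpa using List.of_mem_filter ha'
    have hxb : pvIsx b' = false := by simpa using List.of_mem_filter hb'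
    simp [pvKey, isx_lower, hxa, hxb, Prod.Lex.le_iff, hab]
  · intro a ha b hb
    rw [PySem.List.mem_sorted] at ha hb
    have hxa : pvIsx a = true := List.of_mem_filter ha
    obtain ⟨b', hb', rfl⟩ := List.mem_map.mp hb
    have hxb : pvIsx b' = false := by simpa using List.of_mem_filter hb'
    simp [pvKey, isx_lower, hxa, hxb, Prod.Lex.le_iff]

-- ===== VERDICT (by name: the statement is the Claim_ definition above) =====
theorem ordena_palavras_spec : Claim_equal_ordena_palavras := by
  intro l _
  show ordena_palavras l = ordena_palavras_alt l
  unfold ordena_palavras ordena_palavras_alt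
  rw [foldA]
  simp only [List.nil_append]
  rw [show (fun p => if PySem.Str.startswith (PySem.Str.lower p) "x" then p else PySem.Str.lower p) = pvT from rfl]
  rw [show (fun w => !(PySem.Str.startswith (PySem.Str.lower w) "x")) = (fun w => !(pvIsx w)) from rfl]
  rw [sorted2_eq_sorted_lex]
  rw [show (fun w => toLex (!pvIsx w, w)) = pvKey from rfl]
  refine PySem.List.eq_of_perm_of_pairwise_le_of_injective pvKey key_injective ?_ (pairwiseA l) ?_
  · have p1 := (PySem.List.sorted_perm (l.filter pvIsx) (fun s => s) false).append
      (PySem.List.sorted_perm ((l.filter (fun p => !pvIsx p)).map PySem.Str.lower) (fun s => s) false)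
    have p2 := perm_transformed l
    have p3 := PySem.List.sorted_perm (l.map pvT) pvKey false
    exact p1.trans (p2.symm.trans p3.symm)
  · exact PySem.List.sorted_pairwise _ pvKey
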